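-- pv_equiv track=rewrite | github.com/Talan-ECBU/esf-pipeline-demo | src/esf_pipeline_demo/scraper/common.py | match_product_query
-- ===== SOURCE A (Python) =====
-- def match_product_query(query_ids: dict[list], products: list[dict]) -> list[dict]:
--     """Matches products to their respective queries based on Product IDs."""
--     id_to_query = {
--         product_id: query
--         for query, product_id_list in query_ids.items()
--         for product_id in product_id_list
--     }
--     for product in products:
--         product_id = product.get("product_id", None)
--         if product_id and product_id in id_to_query:
--             product["query"] = id_to_query[product_id]
--
--     return products
-- ===== SOURCE B (Python) =====
-- def match_product_query(query_ids: dict, products: list) -> list: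
--     """Matches products to their respective queries based on Product IDs."""
--     for product in products:
--         product_id = product.get("product_id")
--         if product_id:
--             for query, id_list in query_ids.items():
--                 if product_id in id_list:
--                     product["query"] = query
--     return products
-- ===== Notes on version B (the rewrite author's own statement) =====
-- stated objective: simpler
-- what changed: Drops the prebuilt reverse id->query dict; each product scans query_ids.items() directly and keeps overwriting product['query'] so the last matching query wins, as in A.
import Mathlib
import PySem

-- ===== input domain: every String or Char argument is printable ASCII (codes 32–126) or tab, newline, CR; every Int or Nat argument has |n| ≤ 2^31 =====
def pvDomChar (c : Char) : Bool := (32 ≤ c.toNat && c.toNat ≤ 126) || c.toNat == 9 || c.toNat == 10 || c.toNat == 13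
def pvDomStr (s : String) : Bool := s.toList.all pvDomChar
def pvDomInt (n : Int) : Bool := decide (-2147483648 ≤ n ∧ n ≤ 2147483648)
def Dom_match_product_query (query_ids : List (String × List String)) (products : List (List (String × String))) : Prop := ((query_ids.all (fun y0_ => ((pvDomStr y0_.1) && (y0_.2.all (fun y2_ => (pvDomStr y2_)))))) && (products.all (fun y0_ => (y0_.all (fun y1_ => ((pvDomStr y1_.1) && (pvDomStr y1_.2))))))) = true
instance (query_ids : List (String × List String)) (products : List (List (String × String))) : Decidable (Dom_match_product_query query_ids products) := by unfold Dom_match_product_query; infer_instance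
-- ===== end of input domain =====

-- B drops A's prebuilt reverse id->query dict: each product scans query_ids directly, last matching query wins (simpler decomposition; return value only — both mutate product dicts in place in Python).


-- ===== PORT A =====
-- Python dict parameters arrive as assoc lists; decode them as Python does (PySem.Dict.ofList: duplicate keys merge, last value wins).
def match_product_query (query_ids : List (String × List String)) (products : List (List (String × String))) : List (List (String × String)) :=
  let id_to_query : PySem.Dict String String :=
    (PySem.Dict.ofList query_ids).items.foldl
      (fun d qp => qp.2.foldl (fun d pid => d.insert pid qp.1) d) PySem.Dict.empty
  products.map (fun p =>
    let pd := PySem.Dict.ofList p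
    let pd :=
      match pd.get? "product_id" with
      | none => pd
      | some pid =>
        if pid ≠ "" then
          match id_to_query.get? pid with
          | some q => pd.insert "query" q
          | none => pd
        else pd
    pd.items)

-- ===== PORT B =====
def match_product_query_alt (query_ids : List (String × List String)) (products : List (List (String × String))) : List (List (String × String)) :=
  products.map (fun p =>
    let pd := PySem.Dict.ofList p
    let pd :=
      match pd.get? "product_id" with
      | none => pd
      | some pid =>
        if pid ≠ "" then
          (PySem.Dict.ofList query_ids).items.foldl
            (fun (pd : PySem.Dict String String) (qp : String × List String) => if pid ∈ qp.2 then pd.insert "query" qp.1 else pd) pd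
        else pd
    pd.items)

-- ===== PRECONDITION & SPEC =====
def Spec_match_product_query (query_ids : List (String × List String)) (products : List (List (String × String))) (out : List (List (String × String))) : Prop := out = match_product_query_alt query_ids products
instance (query_ids : List (String × List String)) (products : List (List (String × String))) (out : List (List (String × String))) : Decidable (Spec_match_product_query query_ids products out) := by unfold Spec_match_product_query; infer_instance

-- ===== CLAIM (what is proved, stated in full; the proofs are below) =====
def Claim_equal_match_product_query : Prop := ∀ (query_ids : List (String × List String)) (products : List (List (String × String))), Dom_match_product_query query_ids products → Spec_match_product_query query_ids products (match_product_query query_ids products)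

-- ===== LEMMAS AND PROOFS =====

-- last query in l (in order) whose id-list contains pid
def pvLastMatch (pid : String) (l : List (String × List String)) : Option String :=
  l.foldl (fun acc qp => if pid ∈ qp.2 then some qp.1 else acc) none

theorem pvLastMatch_append (pid : String) (l : List (String × List String)) (x : String × List String) :
    pvLastMatch pid (l ++ [x]) = if pid ∈ x.2 then some x.1 else pvLastMatch pid l := by
  simp [pvLastMatch, List.foldl_append]

theorem pv_inner_get? (pid q : String) (lst : List String) (d : PySem.Dict String String) :
    (lst.foldl (fun d i => d.insert i q) d).get? pid =
      if pid ∈ lst then some q else d.get? pid := by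
  induction lst generalizing d with
  | nil => simp
  | cons i rest ih =>
    simp only [List.foldl_cons, ih, List.mem_cons]
    rcases Decidable.em (pid ∈ rest) with h | h
    · simp [h]
    · simp [h, PySem.Dict.get?_insert]

theorem pv_build_get? (pid : String) (l : List (String × List String)) (d : PySem.Dict String String) :
    (l.foldl (fun d qp => qp.2.foldl (fun d pid => d.insert pid qp.1) d) d).get? pid =
      ((pvLastMatch pid l).or (d.get? pid)) := by
  induction l using List.reverseRecOn generalizing d with
  | nil => simp [pvLastMatch]
  | append_singleton l x ih =>
    simp only [List.foldl_append, List.foldl_cons, List.foldl_nil, pvLastMatch_append, ih,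
      pv_inner_get?]
    rcases Decidable.em (pid ∈ x.2) with h | h <;> simp [h]

theorem pv_bfold (pid : String) (l : List (String × List String)) (pd : PySem.Dict String String) :
    l.foldl (fun (pd : PySem.Dict String String) (qp : String × List String) => if pid ∈ qp.2 then pd.insert "query" qp.1 else pd) pd =
      (match pvLastMatch pid l with
       | some q => pd.insert "query" q
       | none => pd) := by
  induction l using List.reverseRecOn with
  | nil => simp [pvLastMatch]
  | append_singleton l x ih =>
    simp only [List.foldl_append, List.foldl_cons, List.foldl_nil, pvLastMatch_append, ih]
    rcases Decidable.em (pid ∈ x.2) with h | h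
    · simp only [h, if_pos]
      cases hl : pvLastMatch pid l <;> simp [PySem.Dict.insert_insert_self]
    · simp [h]

-- ===== VERDICT (by name: the statement is the Claim_ definition above) =====
theorem match_product_query_spec : Claim_equal_match_product_query := by
  intro query_ids products _
  unfold Spec_match_product_query match_product_query match_product_query_alt
  apply List.map_congr_left
  intro p _
  cases hg : (PySem.Dict.ofList p).get? "product_id" with
  | none => simp only [hg]
  | some pid =>
    simp only [hg]
    rcases Decidable.em (pid = "") with h | h
    · simp only [h, ne_eq, not_true_eq_false, if_false]
    · simp only [ne_eq, h, not_false_eq_true, if_true, pv_bfold, pv_build_get?,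
        PySem.Dict.get?_empty, Option.or_none]
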